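-- pv_equiv track=rewrite | github.com/openvinotoolkit/nncf | nncf/quantization/init_range.py | get_channel_count_and_dim_idx
-- ===== SOURCE A (Python) =====
-- from typing import List, Dict, Set, Optional
--
-- def get_channel_count_and_dim_idx(scale_shape: List[int]):
--     channel_dim_idx = 0
--     channel_count = 1
--     for dim_idx, dim in enumerate(scale_shape):
--         if dim != 1:
--             channel_dim_idx = dim_idx
--             channel_count = dim
--     return channel_count, channel_dim_idx
-- ===== SOURCE B (Python) =====
-- def get_channel_count_and_dim_idx(scale_shape):
--     for dim_idx in range(len(scale_shape) - 1, -1, -1):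
--         dim = scale_shape[dim_idx]
--         if dim != 1:
--             return dim, dim_idx
--     return 1, 0
-- ===== Notes on version B (the rewrite author's own statement) =====
-- stated objective: simpler
-- what changed: Replaces the full forward overwrite-the-answer loop with a reverse scan that returns the last non-unit dimension as soon as it is found (early exit), with the same all-ones fallback.
import Mathlib
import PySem

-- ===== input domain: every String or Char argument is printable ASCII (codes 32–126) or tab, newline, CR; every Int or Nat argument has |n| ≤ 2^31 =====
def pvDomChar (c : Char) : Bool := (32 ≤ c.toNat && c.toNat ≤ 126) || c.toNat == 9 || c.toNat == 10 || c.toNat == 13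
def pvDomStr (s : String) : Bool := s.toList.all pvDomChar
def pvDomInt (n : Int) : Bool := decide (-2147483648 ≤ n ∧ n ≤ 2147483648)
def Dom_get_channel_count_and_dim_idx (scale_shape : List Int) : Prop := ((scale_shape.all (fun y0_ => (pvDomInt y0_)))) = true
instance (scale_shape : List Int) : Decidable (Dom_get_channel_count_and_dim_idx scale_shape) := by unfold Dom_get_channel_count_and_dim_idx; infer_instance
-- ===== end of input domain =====

-- ===== PORT A =====
-- B replaces A's forward overwrite-the-answer loop with a reverse scan with early exit; same return values.
def get_channel_count_and_dim_idx (scale_shape : List Int) : Int × Int :=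
  let st := (PySem.List.enumerate scale_shape 0).foldl
    (fun (st : Int × Int) p => if p.2 ≠ 1 then (p.1, p.2) else st) (0, 1)
  (st.2, st.1)

-- ===== PORT B =====
-- reverse scan: walks the indices len-1 .. 0 (here: the reversed list with a tracked index),
-- returning at the first non-unit dimension
def pvAltGo : List Int → Int → Int × Int
  | [], _ => (1, 0)
  | d :: rest, i => if d ≠ 1 then (d, i) else pvAltGo rest (i - 1)

def get_channel_count_and_dim_idx_alt (scale_shape : List Int) : Int × Int :=
  pvAltGo scale_shape.reverse ((scale_shape.length : Int) - 1)

-- ===== PRECONDITION & SPEC =====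
def Spec_get_channel_count_and_dim_idx (scale_shape : List Int) (out : Int × Int) : Prop := out = get_channel_count_and_dim_idx_alt scale_shape
instance (scale_shape : List Int) (out : Int × Int) : Decidable (Spec_get_channel_count_and_dim_idx scale_shape out) := by unfold Spec_get_channel_count_and_dim_idx; infer_instance

-- ===== CLAIM =====
def Claim_equal_get_channel_count_and_dim_idx : Prop := ∀ (scale_shape : List Int), Dom_get_channel_count_and_dim_idx scale_shape → Spec_get_channel_count_and_dim_idx scale_shape (get_channel_count_and_dim_idx scale_shape)

-- ===== LEMMAS AND PROOFS =====
theorem pv_eq (scale_shape : List Int) :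
    get_channel_count_and_dim_idx scale_shape = get_channel_count_and_dim_idx_alt scale_shape := by
  induction scale_shape using List.reverseRecOn with
  | nil => rfl
  | append_singleton xs d ih =>
    simp only [get_channel_count_and_dim_idx, get_channel_count_and_dim_idx_alt,
      PySem.List.enumerate_append, PySem.List.enumerate_cons, PySem.List.enumerate_nil,
      List.foldl_append, List.foldl_cons, List.foldl_nil, List.reverse_append,
      List.reverse_singleton, List.singleton_append, List.length_append,
      List.length_singleton, pvAltGo] at *
    by_cases hd : d = 1
    · simp only [hd, ne_eq, not_true_eq_false, if_false]
      simpa [show ((xs.length : Int) + 1 - 1 - 1) = (xs.length : Int) - 1 by omega] using ih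
    · simp [hd, show ((xs.length : Int) + 1 - 1) = (xs.length : Int) by omega]

-- ===== VERDICT =====
theorem get_channel_count_and_dim_idx_spec : Claim_equal_get_channel_count_and_dim_idx := by
  intro xs _
  unfold Spec_get_channel_count_and_dim_idx
  exact pv_eq xs
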